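-- pv_equiv track=rewrite | github.com/Fixx910/Sudoku-con-Algoritmo-Genetico | sudokuGeneradorSoluciones.py | encontrarIndicesRepetidos
-- ===== SOURCE A (Python) =====
-- def encontrarIndicesRepetidos(lista):
--     indice_por_valor = {}
--     for indice, valor in enumerate(lista):
--         if valor in indice_por_valor:
--             return [indice_por_valor[valor], indice]
--         else:
--             indice_por_valor[valor] = indice
--     return None
-- ===== SOURCE B (Python) =====
-- def encontrarIndicesRepetidos(lista):
--     for j in range(len(lista)):
--         for i in range(j):
--             if lista[i] == lista[j]:
--                 return [i, j]
--     return None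
-- ===== Notes on version B (the rewrite author's own statement) =====
-- stated objective: alternative
-- what changed: Replaced the dict-of-first-indices single pass with an index-based brute-force nested scan: for each j, scan i < j left to right and return [i, j] on the first match.
import Mathlib
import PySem

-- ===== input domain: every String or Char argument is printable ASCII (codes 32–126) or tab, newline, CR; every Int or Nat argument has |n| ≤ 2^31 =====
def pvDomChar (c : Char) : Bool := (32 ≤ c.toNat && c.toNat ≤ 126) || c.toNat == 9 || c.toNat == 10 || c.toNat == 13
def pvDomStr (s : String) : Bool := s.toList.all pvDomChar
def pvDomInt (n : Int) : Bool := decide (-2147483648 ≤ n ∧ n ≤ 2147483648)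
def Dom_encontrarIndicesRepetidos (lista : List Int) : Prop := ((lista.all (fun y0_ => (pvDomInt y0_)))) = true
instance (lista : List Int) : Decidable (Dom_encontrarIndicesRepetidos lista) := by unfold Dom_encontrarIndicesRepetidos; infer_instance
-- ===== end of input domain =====

-- B replaces A's dict-of-first-indices single pass by a brute-force nested index scan (alternative decomposition, not faster).

-- ===== PORT A =====
-- 'for indice, valor in enumerate(lista): if valor in indice_por_valor: return [...]; else: d[valor] = indice'
def pvALoop (d : PySem.Dict Int Int) : List (Int × Int) → Option (List Int)
  | [] => none
  | (i, v) :: rest =>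
    match d.get? v with
    | some k => some [k, i]
    | none => pvALoop (d.insert v i) rest

def encontrarIndicesRepetidos (lista : List Int) : Option (List Int) :=
  pvALoop PySem.Dict.empty (PySem.List.enumerate lista)

-- ===== PORT B =====
-- inner loop 'for i in range(j): if lista[i] == lista[j]: return [i, j]'
def pvBInner (lista : List Int) (j : Int) : List Int → Option (List Int)
  | [] => none
  | i :: is =>
    if PySem.List.pyGet? lista i = PySem.List.pyGet? lista j then some [i, j]
    else pvBInner lista j is

-- outer loop 'for j in range(len(lista))', propagating the inner return
def pvBOuter (lista : List Int) : List Int → Option (List Int)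
  | [] => none
  | j :: js =>
    match pvBInner lista j (PySem.List.pyRange 0 j 1) with
    | some r => some r
    | none => pvBOuter lista js

def encontrarIndicesRepetidos_alt (lista : List Int) : Option (List Int) :=
  pvBOuter lista (PySem.List.pyRange 0 (lista.length : Int) 1)

-- ===== PRECONDITION & SPEC =====
def Spec_encontrarIndicesRepetidos (lista : List Int) (out : Option (List Int)) : Prop := out = encontrarIndicesRepetidos_alt lista
instance (lista : List Int) (out : Option (List Int)) : Decidable (Spec_encontrarIndicesRepetidos lista out) := by unfold Spec_encontrarIndicesRepetidos; infer_instance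

-- ===== CLAIM (what is proved, stated in full; the proofs are below) =====
def Claim_equal_encontrarIndicesRepetidos : Prop := ∀ (lista : List Int), Dom_encontrarIndicesRepetidos lista → Spec_encontrarIndicesRepetidos lista (encontrarIndicesRepetidos lista)

-- ===== LEMMAS AND PROOFS =====

-- first index of v in a list (proof-side reference)
def pvFirstIdx : List Int → Int → Option Nat
  | [], _ => none
  | x :: xs, v => if x = v then some 0 else (pvFirstIdx xs v).map (· + 1)

theorem pvFirstIdx_append_singleton_of_none (p : List Int) (x v : Int)
    (h : pvFirstIdx p v = none) :
    pvFirstIdx (p ++ [x]) v = if x = v then some p.length else none := by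
  induction p with
  | nil => simp [pvFirstIdx]
  | cons a p ih =>
    simp only [pvFirstIdx] at h ⊢
    by_cases hav : a = v
    · simp [hav] at h
    · simp only [if_neg hav, Option.map_eq_none_iff] at h
      simp only [List.cons_append, pvFirstIdx, if_neg hav, ih h]
      split_ifs <;> simp

theorem pvFirstIdx_append_singleton_of_ne (p : List Int) (x w : Int)
    (h : ¬ x = w) : pvFirstIdx (p ++ [x]) w = pvFirstIdx p w := by
  induction p with
  | nil => simp [pvFirstIdx, h]
  | cons a p ihp =>
    simp only [List.cons_append, pvFirstIdx]
    split_ifs with ha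
    · rfl
    · rw [ihp]

-- the inner scan over pyRange q.length .. q.length + p.length finds the first match of v in p
theorem pvBInner_spec (v : Int) (rest : List Int) :
    ∀ (p q : List Int),
      pvBInner (q ++ (p ++ v :: rest)) ((q.length : Int) + (p.length : Int))
        (PySem.List.pyRange (q.length : Int) ((q.length : Int) + (p.length : Int)) 1)
      = (pvFirstIdx p v).map
          (fun i => [((q.length + i : Nat) : Int), ((q.length + p.length : Nat) : Int)]) := by
  intro p
  induction p with
  | nil =>
    intro q
    rw [PySem.List.pyRange_one_eq_nil (by simp)]
    simp [pvBInner, pvFirstIdx]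
  | cons x p ih =>
    intro q
    rw [PySem.List.pyRange_one_cons (by
      have : (0:Int) < ((x :: p).length : Int) := by exact_mod_cast Nat.succ_pos p.length
      omega)]
    have hj : PySem.List.pyGet? (q ++ ((x :: p) ++ v :: rest)) ((q.length : Int) + ((x :: p).length : Int)) = some v := by
      have := PySem.List.pyGet?_append_length (pre := q ++ (x :: p)) (y := v) (ys := rest)
      simp only [List.append_assoc, List.length_append, Nat.cast_add] at this
      exact this
    have hq : PySem.List.pyGet? (q ++ ((x :: p) ++ v :: rest)) ((q.length : Int)) = some x := by
      have := PySem.List.pyGet?_append_length (pre := q) (y := x) (ys := p ++ v :: rest)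
      simp only [List.cons_append] at this ⊢
      exact this
    simp only [pvBInner, hj, hq]
    by_cases hxv : x = v
    · simp [hxv, pvFirstIdx]
    · rw [if_neg (by simp [hxv])]
      have ih' := ih (q ++ [x])
      have hlen : ((q ++ [x]).length : Int) = (q.length : Int) + 1 := by simp
      have hla : (q ++ [x]) ++ (p ++ v :: rest) = q ++ ((x :: p) ++ v :: rest) := by
        simp
      rw [hla, hlen] at ih'
      have harith : (q.length : Int) + 1 + (p.length : Int) = (q.length : Int) + ((x :: p).length : Int) := by
        simp; omega
      rw [harith] at ih'
      rw [ih']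
      simp only [pvFirstIdx, if_neg hxv]
      cases hfi : pvFirstIdx p v with
      | none => simp
      | some i =>
        simp only [Option.map_some]
        simp only [Option.some.injEq, List.cons.injEq, and_true]
        constructor <;> (push_cast; omega)

-- main loop correspondence: prefix p already scanned, dict d holds first indices of p
theorem pvLoop_spec :
    ∀ (rest p : List Int) (d : PySem.Dict Int Int),
      (∀ w, d.get? w = (pvFirstIdx p w).map (fun n => (n : Int))) →
      pvALoop d (PySem.List.enumerate rest (p.length : Int))
      = pvBOuter (p ++ rest)
          (PySem.List.pyRange (p.length : Int) (((p ++ rest).length : Nat) : Int) 1) := by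
  intro rest
  induction rest with
  | nil =>
    intro p d hd
    rw [PySem.List.pyRange_one_eq_nil (by simp)]
    simp [PySem.List.enumerate_nil, pvALoop, pvBOuter]
  | cons v rest ih =>
    intro p d hd
    rw [PySem.List.enumerate_cons]
    have hlen : (((p ++ v :: rest).length : Nat) : Int) = (p.length : Int) + ((v :: rest).length : Int) := by
      simp
    rw [hlen, PySem.List.pyRange_one_cons (by
      have : (0:Int) < ((v :: rest).length : Int) := by exact_mod_cast Nat.succ_pos rest.length
      omega)]
    have hinner := pvBInner_spec v rest p []
    simp only [List.length_nil, Nat.cast_zero, zero_add, List.nil_append] at hinner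
    simp only [pvALoop, pvBOuter, hinner, hd v]
    cases hfi : pvFirstIdx p v with
    | some i => simp
    | none =>
      simp only [Option.map_none]
      have hd' : ∀ w, (d.insert v (p.length : Int)).get? w
          = (pvFirstIdx (p ++ [v]) w).map (fun n => (n : Int)) := by
        intro w
        by_cases hwv : w = v
        · subst hwv
          rw [PySem.Dict.get?_insert_self]
          rw [pvFirstIdx_append_singleton_of_none _ _ _ hfi]
          simp
        · rw [PySem.Dict.get?_insert_of_ne d _ hwv, hd w]
          rw [pvFirstIdx_append_singleton_of_ne p v w (fun h => hwv h.symm)]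
      have := ih (p ++ [v]) (d.insert v (p.length : Int)) hd'
      have e1 : ((p ++ [v]).length : Int) = (p.length : Int) + 1 := by simp
      have e2 : (p ++ [v]) ++ rest = p ++ v :: rest := by simp
      rw [e1, e2] at this
      rw [this]
      simp

-- ===== VERDICT (by name: the statement is the Claim_ definition above) =====
theorem encontrarIndicesRepetidos_spec : Claim_equal_encontrarIndicesRepetidos := by
  intro lista _
  unfold Spec_encontrarIndicesRepetidos encontrarIndicesRepetidos encontrarIndicesRepetidos_alt
  have := pvLoop_spec lista [] PySem.Dict.empty (by intro w; simp [pvFirstIdx, PySem.Dict.get?_empty])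
  simp at this
  exact this
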